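-- pv_equiv track=rewrite | github.com/superbunny38/2022-3CodingTestPrepTeam | Week1/조이스틱/류채은.py | straight_forward
-- ===== SOURCE A (Python) =====
-- def straight_forward(name):
--
--     last_not_A = len(name)-1
--     for idx,alphabet in enumerate(name[::-1]):
--         if alphabet == 'A':
--             continue
--         else:
--             last_not_A = (len(name)-1)-idx
--             break
--     return last_not_A
-- ===== SOURCE B (Python) =====
-- def straight_forward(name):
--     last = len(name) - 1
--     for i, c in enumerate(name):
--         if c != 'A':
--             last = i
--     return last
-- ===== Notes on version B (the rewrite author's own statement) =====
-- stated objective: simpler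
-- what changed: Instead of reversing the string and breaking out of an enumerate loop at the first non-matching letter (returning len-1-idx), B makes one forward pass keeping the running index of the latest non-matching letter, defaulted to len(name)-1.
import Mathlib
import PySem

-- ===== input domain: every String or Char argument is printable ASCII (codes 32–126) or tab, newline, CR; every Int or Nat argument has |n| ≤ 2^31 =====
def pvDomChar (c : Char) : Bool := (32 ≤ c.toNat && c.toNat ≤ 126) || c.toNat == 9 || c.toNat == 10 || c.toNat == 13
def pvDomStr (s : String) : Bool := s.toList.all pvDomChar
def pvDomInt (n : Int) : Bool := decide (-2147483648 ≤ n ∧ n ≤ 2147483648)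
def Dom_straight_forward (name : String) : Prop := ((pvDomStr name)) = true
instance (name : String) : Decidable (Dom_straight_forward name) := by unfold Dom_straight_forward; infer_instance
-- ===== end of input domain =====

-- B replaces A's reverse-and-break search by a single forward pass keeping the running last non-'A' index (simpler decomposition; same cost).

-- ===== PORT A =====
-- the for-loop with break: stops at the first non-'A' of the reversed string
def aGo (n : Int) : List (Int × Char) → Int → Int
  | [], last_not_A => last_not_A
  | (idx, alphabet) :: rest, last_not_A =>
      if alphabet = 'A' then aGo n rest last_not_A else (n - 1) - idx

def straight_forward (name : String) : Int :=
  let n : Int := (name.toList.length : Int)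
  -- name[::-1] is the reversal (PySem.Str.slice?_none_none_neg_one)
  aGo n (PySem.List.enumerate name.toList.reverse 0) (n - 1)

-- ===== PORT B =====
def straight_forward_alt (name : String) : Int :=
  (PySem.List.enumerate name.toList 0).foldl
    (fun last p => if p.2 ≠ 'A' then p.1 else last)
    ((name.toList.length : Int) - 1)

-- ===== PRECONDITION & SPEC =====
def Spec_straight_forward (name : String) (out : Int) : Prop := out = straight_forward_alt name
instance (name : String) (out : Int) : Decidable (Spec_straight_forward name out) := by unfold Spec_straight_forward; infer_instance

-- ===== CLAIM (what is proved, stated in full; the proofs are below) =====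
def Claim_equal_straight_forward : Prop := ∀ (name : String), Dom_straight_forward name → Spec_straight_forward name (straight_forward name)

-- ===== LEMMAS AND PROOFS =====

-- index of the first non-'A' character, if any
def firstIdx : List Char → Option Nat
  | [] => none
  | c :: r => if c = 'A' then (firstIdx r).map (· + 1) else some 0

theorem aGo_char (xs : List Char) : ∀ (n s last : Int),
    aGo n (PySem.List.enumerate xs s) last =
      match firstIdx xs with
      | none => last
      | some k => n - 1 - (s + (k : Int)) := by
  induction xs with
  | nil => intro n s last; simp [PySem.List.enumerate_nil, aGo, firstIdx]
  | cons c r ih =>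
      intro n s last
      rw [PySem.List.enumerate_cons]
      by_cases hc : c = 'A'
      · simp only [aGo, hc, if_pos rfl, firstIdx, ih n (s + 1) last]
        cases h : firstIdx r with
        | none => simp [h]
        | some k => simp [h]; push_cast; ring
      · simp [aGo, hc, firstIdx]

theorem bFold_char (l : List Char) : ∀ (d : Int),
    (PySem.List.enumerate l 0).foldl (fun last p => if p.2 ≠ 'A' then p.1 else last) d =
      match firstIdx l.reverse with
      | none => d
      | some k => (l.length : Int) - 1 - (k : Int) := by
  induction l using List.reverseRecOn with
  | nil => intro d; simp [PySem.List.enumerate_nil, firstIdx]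
  | append_singleton m c ih =>
      intro d
      rw [PySem.List.enumerate_append, List.foldl_append, ih d]
      simp only [PySem.List.enumerate_cons, PySem.List.enumerate_nil, List.foldl_cons,
        List.foldl_nil, List.reverse_append, List.reverse_cons, List.reverse_nil,
        List.nil_append, List.singleton_append, firstIdx, List.length_append,
        List.length_cons, List.length_nil]
      by_cases hc : c = 'A'
      · rw [hc, if_neg (by simp), if_pos rfl]
        cases h : firstIdx m.reverse with
        | none => simp [h]
        | some k => simp only [h, Option.map_some]; push_cast; ring
      · rw [if_pos hc, if_neg hc]
        push_cast; ring

-- ===== VERDICT (by name: the statement is the Claim_ definition above) =====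
theorem straight_forward_spec : Claim_equal_straight_forward := by
  intro name _
  unfold Spec_straight_forward straight_forward straight_forward_alt
  rw [aGo_char, bFold_char]
  cases h : firstIdx name.toList.reverse with
  | none => simp
  | some k => simp
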